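-- pv_equiv track=rewrite | github.com/hasbyramadhan/Testing_MSBU | controllers/testing.py | max_skill
-- ===== SOURCE A (Python) =====
-- def max_skill(N, M, A, B):
--     current_skill = M
--     players = list(zip(A, B))
--     players.sort()
--
--     for a, b in players:
--         if current_skill >= a:
--             current_skill += b
--         else:
--             break
--
--     return current_skill
-- ===== SOURCE B (Python) =====
-- def max_skill(N, M, A, B):
--     players = sorted(zip(A, B))
--     # phase 1: prefix[j] = skill before facing player j (prefix[-1] = skill after all)
--     prefix = [M]
--     for _, b in players:
--         prefix.append(prefix[-1] + b)
--     # phase 2: first player whose threshold exceeds the skill available decides the answer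
--     for (a, _), p in zip(players, prefix):
--         if p < a:
--             return p
--     return prefix[-1]
-- ===== Notes on version B (the rewrite author's own statement) =====
-- stated objective: alternative
-- what changed: Replaces the fused greedy break-loop with a two-phase decomposition: first materialize a prefix-sum table of skill-before-each-player, then scan it for the first player whose threshold exceeds the table entry (falling back to the full total).
import Mathlib
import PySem

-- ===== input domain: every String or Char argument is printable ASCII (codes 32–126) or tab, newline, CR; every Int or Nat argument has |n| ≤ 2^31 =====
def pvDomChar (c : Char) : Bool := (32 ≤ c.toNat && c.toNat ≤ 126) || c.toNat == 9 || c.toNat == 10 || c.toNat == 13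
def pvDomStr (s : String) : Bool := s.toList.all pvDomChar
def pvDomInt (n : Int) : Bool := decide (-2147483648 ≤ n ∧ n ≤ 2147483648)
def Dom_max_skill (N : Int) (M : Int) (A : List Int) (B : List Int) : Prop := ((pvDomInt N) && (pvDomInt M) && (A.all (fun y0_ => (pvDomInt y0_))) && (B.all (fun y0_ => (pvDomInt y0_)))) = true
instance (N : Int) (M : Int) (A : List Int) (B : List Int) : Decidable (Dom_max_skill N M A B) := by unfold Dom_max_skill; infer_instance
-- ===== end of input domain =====

-- B is a two-phase decomposition (materialize a pref-skill table, then scan it);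
-- same cost as A, proved to return the same value on every input.

-- ===== PORT A =====
-- the fused greedy loop with break: accumulate b while current skill covers a
def pvLoopA : Int → List (Int × Int) → Int
  | cur, [] => cur
  | cur, (a, b) :: rest => if cur ≥ a then pvLoopA (cur + b) rest else cur

def max_skill (N : Int) (M : Int) (A : List Int) (B : List Int) : Int :=
  pvLoopA M (PySem.List.sorted2 (A.zip B) Prod.fst Prod.snd false)

-- ===== PORT B =====
def max_skill_alt (N : Int) (M : Int) (A : List Int) (B : List Int) : Int :=
  let players := PySem.List.sorted2 (A.zip B) Prod.fst Prod.snd false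
  -- phase 1: pref table, built by appending pref[-1] + b
  let pref := players.foldl (fun pr p => pr ++ [pr.getLastD 0 + p.2]) [M]
  -- phase 2: first pair with pref entry below the threshold, else pref[-1]
  match (players.zip pref).find? (fun q => decide (q.2 < q.1.1)) with
  | some q => q.2
  | none => pref.getLastD 0

-- ===== PRECONDITION & SPEC =====
def Spec_max_skill (N : Int) (M : Int) (A : List Int) (B : List Int) (out : Int) : Prop := out = max_skill_alt N M A B
instance (N : Int) (M : Int) (A : List Int) (B : List Int) (out : Int) : Decidable (Spec_max_skill N M A B out) := by unfold Spec_max_skill; infer_instance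

-- ===== CLAIM (what is proved, stated in full; the proofs are below) =====
def Claim_equal_max_skill : Prop := ∀ (N : Int) (M : Int) (A : List Int) (B : List Int), Dom_max_skill N M A B → Spec_max_skill N M A B (max_skill N M A B)

-- ===== LEMMAS AND PROOFS =====

-- the ideal pref table: pvScanP m L = [m, m+b₀, m+b₀+b₁, …]
def pvScanP : Int → List (Int × Int) → List Int
  | m, [] => [m]
  | m, p :: rest => m :: pvScanP (m + p.2) rest

lemma pvScanP_ne_nil (m : Int) (L : List (Int × Int)) : pvScanP m L ≠ [] := by
  cases L <;> simp [pvScanP]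

-- B's append-loop builds exactly pvScanP, under any already-built accumulator
lemma pvPrefix_foldl (L : List (Int × Int)) (acc : List Int) (m : Int) :
    L.foldl (fun pr p => pr ++ [pr.getLastD 0 + p.2]) (acc ++ [m]) = acc ++ pvScanP m L := by
  induction L generalizing acc m with
  | nil => simp [pvScanP]
  | cons p t ih =>
    simp only [List.foldl_cons, pvScanP]
    have h1 : (acc ++ [m]).getLastD 0 = m := by simp
    rw [h1]
    have h2 : acc ++ [m] ++ [m + p.2] = (acc ++ [m]) ++ [m + p.2] := by simp
    rw [h2, ih (acc ++ [m]) (m + p.2)]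
    simp

lemma pvScanP_getLastD_cons (m m' : Int) (p : Int × Int) (t : List (Int × Int)) :
    (m :: pvScanP m' t).getLastD 0 = (pvScanP m' t).getLastD 0 := by
  cases h : pvScanP m' t with
  | nil => exact absurd h (pvScanP_ne_nil m' t)
  | cons x xs => simp

-- the core equivalence: the greedy loop equals the table-then-scan over the same list
lemma pvLoop_eq_scan (L : List (Int × Int)) (m : Int) :
    pvLoopA m L =
      (match (L.zip (pvScanP m L)).find? (fun q => decide (q.2 < q.1.1)) with
       | some q => q.2
       | none => (pvScanP m L).getLastD 0) := by
  induction L generalizing m with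
  | nil => simp [pvLoopA, pvScanP]
  | cons p t ih =>
    obtain ⟨a, b⟩ := p
    simp only [pvLoopA, pvScanP, List.zip_cons_cons, List.find?_cons]
    by_cases h : m < a
    · have h' : ¬ m ≥ a := by omega
      simp [h, h']
    · have h' : m ≥ a := by omega
      simp only [h', if_true]
      have hd : (decide (m < a)) = false := by simp [h]
      rw [hd]
      rw [ih (m + b)]
      cases hf : (t.zip (pvScanP (m + b) t)).find? (fun q => decide (q.2 < q.1.1)) with
      | some q => simp
      | none =>
        simp only []
        exact (pvScanP_getLastD_cons m (m + b) (a, b) t).symm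

-- ===== VERDICT (by name: the statement is the Claim_ definition above) =====
theorem max_skill_spec : Claim_equal_max_skill := by
  intro N M A B _
  show max_skill N M A B = max_skill_alt N M A B
  unfold max_skill max_skill_alt
  simp only []
  have hp := pvPrefix_foldl (PySem.List.sorted2 (A.zip B) Prod.fst Prod.snd false) [] M
  simp only [List.nil_append] at hp
  rw [hp]
  exact pvLoop_eq_scan _ M
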